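-- pv_equiv track=rewrite | github.com/mateuszdobrzanski/producthunt | products/models.py | get_index_of_last_space
-- ===== SOURCE A (Python) =====
-- def get_index_of_last_space(text):
--     index = 0
--     pom = 0
--
--     for i in text:
--         if i.isspace():
--             index = pom
--         pom += 1
--     return index
-- ===== SOURCE B (Python) =====
-- def get_index_of_last_space(text):
--     for i in range(len(text) - 1, -1, -1):
--         if text[i].isspace():
--             return i
--     return 0
-- ===== Notes on version B (the rewrite author's own statement) =====
-- stated objective: simpler
-- what changed: Replaces the forward scan that maintains index/position accumulators with a reverse scan that returns the first whitespace index found from the end (early exit), with 0 on no match.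
import Mathlib
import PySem

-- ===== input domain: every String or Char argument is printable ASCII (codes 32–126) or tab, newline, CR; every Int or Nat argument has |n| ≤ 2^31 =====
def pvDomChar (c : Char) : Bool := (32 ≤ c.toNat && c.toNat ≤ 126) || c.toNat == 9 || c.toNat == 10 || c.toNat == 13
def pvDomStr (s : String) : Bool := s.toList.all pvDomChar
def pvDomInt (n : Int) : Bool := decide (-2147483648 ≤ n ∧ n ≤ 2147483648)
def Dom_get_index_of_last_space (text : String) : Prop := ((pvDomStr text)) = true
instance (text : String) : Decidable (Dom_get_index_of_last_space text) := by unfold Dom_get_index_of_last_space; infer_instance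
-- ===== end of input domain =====

-- B replaces A's forward scan with accumulators by a reverse scan with early return (simpler control flow, same O(n)).


-- ===== PORT A =====
-- forward scan keeping (index, pom); pom counts characters seen so far
def get_index_of_last_space (text : String) : Int :=
  (text.toList.foldl
    (fun (s : Int × Int) c => (if PySem.Chars.isspace c then s.2 else s.1, s.2 + 1))
    ((0 : Int), (0 : Int))).1

-- ===== PORT B =====
-- loop 'for i in range(len(text)-1, -1, -1)': counter n = i+1; the 'none' branch is unreachable (i < len in every call)
def altGo (cs : List Char) : Nat → Int
  | 0 => 0
  | i + 1 =>
    match PySem.List.pyGet? cs (i : Int) with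
    | some c => if PySem.Chars.isspace c then (i : Int) else altGo cs i
    | none => altGo cs i

def get_index_of_last_space_alt (text : String) : Int :=
  altGo text.toList text.toList.length

-- ===== PRECONDITION & SPEC =====
def Spec_get_index_of_last_space (text : String) (out : Int) : Prop := out = get_index_of_last_space_alt text
instance (text : String) (out : Int) : Decidable (Spec_get_index_of_last_space text out) := by unfold Spec_get_index_of_last_space; infer_instance

-- ===== CLAIM (what is proved, stated in full; the proofs are below) =====
def Claim_equal_get_index_of_last_space : Prop := ∀ (text : String), Dom_get_index_of_last_space text → Spec_get_index_of_last_space text (get_index_of_last_space text)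

-- ===== LEMMAS AND PROOFS =====

theorem pvFoldSnd (cs : List Char) (s : Int × Int) :
    (cs.foldl (fun (s : Int × Int) c => (if PySem.Chars.isspace c then s.2 else s.1, s.2 + 1)) s).2
      = s.2 + cs.length := by
  induction cs generalizing s with
  | nil => simp
  | cons c cs ih => simp [List.foldl, ih]; ring

theorem pvAltGoAppend (cs : List Char) (c : Char) (n : Nat) (h : n ≤ cs.length) :
    altGo (cs ++ [c]) n = altGo cs n := by
  induction n with
  | zero => rfl
  | succ i ih =>
    have hi : i < cs.length := h
    have hget : PySem.List.pyGet? (cs ++ [c]) (i : Int) = PySem.List.pyGet? cs (i : Int) := by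
      rw [PySem.List.pyGet?_natCast, PySem.List.pyGet?_natCast,
        List.getElem?_append_left hi]
    simp only [altGo, hget, ih (Nat.le_of_lt hi)]

theorem pvMain (cs : List Char) :
    (cs.foldl (fun (s : Int × Int) c => (if PySem.Chars.isspace c then s.2 else s.1, s.2 + 1))
      ((0 : Int), (0 : Int))).1 = altGo cs cs.length := by
  induction cs using List.reverseRecOn with
  | nil => rfl
  | append_singleton cs c ih =>
    have hget : PySem.List.pyGet? (cs ++ [c]) ((cs.length : Nat) : Int) = some c := by
      rw [PySem.List.pyGet?_natCast]
      simp
    rw [List.foldl_append]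
    simp only [List.length_append, List.length_singleton, List.foldl, altGo, hget]
    by_cases hs : PySem.Chars.isspace c
    · simp [hs, pvFoldSnd]
    · simp [hs, ih, pvAltGoAppend cs c cs.length (le_refl _)]

-- ===== VERDICT (by name: the statement is the Claim_ definition above) =====
theorem get_index_of_last_space_spec : Claim_equal_get_index_of_last_space := by
  intro text _
  unfold Spec_get_index_of_last_space get_index_of_last_space get_index_of_last_space_alt
  exact pvMain text.toList
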